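-- pv_equiv track=rewrite | github.com/DeEmilyRose/kata-yatzy-refactorizado | src/yatzy1.py | two_pair
-- ===== SOURCE A (Python) =====
-- def two_pair(*dice):
--     list_two_pair = []
--
--     for die in range(6, 0, -1):
--         if dice.count(die) >= 2:
--             list_two_pair.append(die)
--         if len(list_two_pair) == 2:
--             return sum(list_two_pair) * 2
--     return 0
-- ===== SOURCE B (Python) =====
-- def two_pair(*dice):
--     # sort descending once, then a single adjacent-equality scan finds pair faces
--     # in decreasing order; stop as soon as two distinct pair faces are found.
--     prev = None
--     first = 0
--     for v in sorted(dice, reverse=True):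
--         if v == prev and v != first and 1 <= v <= 6:
--             if first:
--                 return (first + v) * 2
--             first = v
--         prev = v
--     return 0
-- ===== Notes on version B (the rewrite author's own statement) =====
-- stated objective: alternative
-- what changed: Replaces the six descending per-face .count scans with one sort (descending) followed by a single adjacent-equality scan that picks up the two largest pair faces in 1..6.
import Mathlib
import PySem

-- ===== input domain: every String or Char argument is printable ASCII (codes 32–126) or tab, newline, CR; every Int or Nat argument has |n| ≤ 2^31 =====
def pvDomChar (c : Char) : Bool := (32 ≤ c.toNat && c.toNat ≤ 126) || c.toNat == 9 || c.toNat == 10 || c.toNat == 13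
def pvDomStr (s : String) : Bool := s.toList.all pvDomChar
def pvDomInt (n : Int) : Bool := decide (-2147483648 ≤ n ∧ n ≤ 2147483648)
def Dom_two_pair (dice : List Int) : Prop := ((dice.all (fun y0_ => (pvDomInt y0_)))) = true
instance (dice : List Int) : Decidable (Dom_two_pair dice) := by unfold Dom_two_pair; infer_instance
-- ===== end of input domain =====

-- B replaces A's six descending per-face count scans by one descending sort followed by a
-- single adjacent-equality scan; same value everywhere (objective: alternative).

-- ===== PORT A =====
-- for die in range(6, 0, -1): append die if dice.count(die) >= 2; return sum*2 once two collected
def two_pair_loopA (dice : List Int) : List Int → List Int → Int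
  | _, [] => 0
  | acc, die :: rest =>
    let acc' := if 2 ≤ PySem.List.count dice die then acc ++ [die] else acc
    if acc'.length = 2 then acc'.sum * 2 else two_pair_loopA dice acc' rest

def two_pair (dice : List Int) : Int :=
  two_pair_loopA dice [] (PySem.List.pyRange 6 0 (-1))

-- ===== PORT B =====
-- for v in sorted(dice, reverse=True): detect an adjacent equal pair face, largest first;
-- `prev = None` is `none`, `if first:` is `if first ≠ 0`
def two_pair_scanB : Option Int → Int → List Int → Int
  | _, _, [] => 0
  | prev, first, v :: rest =>
    if prev = some v ∧ v ≠ first ∧ 1 ≤ v ∧ v ≤ 6 then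
      if first ≠ 0 then (first + v) * 2
      else two_pair_scanB (some v) v rest
    else two_pair_scanB (some v) first rest

def two_pair_alt (dice : List Int) : Int :=
  two_pair_scanB none 0 (PySem.List.sorted dice (fun x => x) true)

-- ===== PRECONDITION & SPEC =====
def Spec_two_pair (dice : List Int) (out : Int) : Prop := out = two_pair_alt dice
instance (dice : List Int) (out : Int) : Decidable (Spec_two_pair dice out) := by unfold Spec_two_pair; infer_instance

-- ===== CLAIM (what is proved, stated in full; the proofs are below) =====
def Claim_equal_two_pair : Prop := ∀ (dice : List Int), Dom_two_pair dice → Spec_two_pair dice (two_pair dice)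

-- ===== LEMMAS AND PROOFS =====

-- the pair faces of xs, in descending order (shared characterisation of both programs)
def pvPairs (xs : List Int) : List Int :=
  ([6, 5, 4, 3, 2, 1] : List Int).filter (fun w => decide (2 ≤ xs.count w))

-- the pair faces B's scan can still find given previous value p and already-found face `first`
def pvCand (p first : Int) (todo : List Int) : List Int :=
  ([6, 5, 4, 3, 2, 1] : List Int).filter
    (fun w => decide (w ≠ first ∧ (2 ≤ todo.count w ∨ (w = p ∧ 1 ≤ todo.count w))))

def pvOut2 : List Int → Int
  | a :: b :: _ => (a + b) * 2
  | _ => 0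

-- A's descending loop returns twice the sum of the first two pair faces: pvOut2 of pvPairs
lemma pvA_eq (dice : List Int) : two_pair dice = pvOut2 (pvPairs dice) := by
  have hr : PySem.List.pyRange 6 0 (-1) = [6, 5, 4, 3, 2, 1] := by decide
  rw [two_pair, hr]
  by_cases h6 : 2 ≤ dice.count (6:Int) <;>
  by_cases h5 : 2 ≤ dice.count (5:Int) <;>
  by_cases h4 : 2 ≤ dice.count (4:Int) <;>
  by_cases h3 : 2 ≤ dice.count (3:Int) <;>
  by_cases h2 : 2 ≤ dice.count (2:Int) <;>
  by_cases h1 : 2 ≤ dice.count (1:Int) <;>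
  simp [two_pair_loopA, pvPairs, pvOut2, PySem.List.count_eq, h1, h2, h3, h4, h5, h6]

-- filter of a strictly descending list: one selected head v, tails pointwise equal below v
lemma pvFilter_cons (l : List Int) (p q : Int → Bool) (v : Int)
    (hl : List.Pairwise (· > ·) l) (hv : v ∈ l)
    (hpv : p v = true) (hqv : q v = false)
    (hgt : ∀ w ∈ l, v < w → p w = false ∧ q w = false)
    (hlt : ∀ w ∈ l, w < v → p w = q w) :
    l.filter p = v :: l.filter q := by
  induction l with
  | nil => cases hv
  | cons a t ih =>
    rcases List.pairwise_cons.mp hl with ⟨ha, ht⟩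
    rcases List.mem_cons.mp hv with rfl | hvt
    · have htail : t.filter p = t.filter q := by
        apply List.filter_congr
        intro w hw
        exact hlt w (List.mem_cons_of_mem _ hw) (ha w hw)
      simp [hpv, hqv, htail]
    · have hav : v < a := ha v hvt
      have hpa := (hgt a (List.mem_cons_self) hav).1
      have hqa := (hgt a (List.mem_cons_self) hav).2
      have := ih ht hvt
        (fun w hw hvw => hgt w (List.mem_cons_of_mem _ hw) hvw)
        (fun w hw hwv => hlt w (List.mem_cons_of_mem _ hw) hwv)
      simp [hpa, hqa, this]

lemma pvFilter_head (l : List Int) (p : Int → Bool) (v : Int)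
    (hl : List.Pairwise (· > ·) l) (hv : v ∈ l)
    (hpv : p v = true)
    (hgt : ∀ w ∈ l, v < w → p w = false) :
    ∃ t, l.filter p = v :: t := by
  refine ⟨l.filter (fun w => p w && !(w == v)), pvFilter_cons l p _ v hl hv hpv (by simp) ?_ ?_⟩
  · intro w hw hvw
    exact ⟨hgt w hw hvw, by simp [hgt w hw hvw]⟩
  · intro w hw hwv
    simp [show w ≠ v by omega]

lemma pvMem_faces (v : Int) (h1 : 1 ≤ v) (h6 : v ≤ 6) : v ∈ ([6, 5, 4, 3, 2, 1] : List Int) := by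
  simp only [List.mem_cons, List.not_mem_nil, or_false]
  omega

lemma pvFaces_sorted : List.Pairwise (· > ·) ([6, 5, 4, 3, 2, 1] : List Int) := by decide

-- B's scan on a descending tail returns pvOut2 of the remaining candidates
lemma pvScan_spec (todo : List Int) : ∀ (p first : Int),
    List.Pairwise (fun a b => b ≤ a) todo → (∀ x ∈ todo, x ≤ p) →
    two_pair_scanB (some p) first todo =
      if first = 0 then pvOut2 (pvCand p first todo)
      else (match pvCand p first todo with | c :: _ => (first + c) * 2 | [] => 0) := by
  induction todo with
  | nil =>
    intro p first _ _
    have hc : pvCand p first [] = [] := by simp [pvCand]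
    rw [hc]
    simp [two_pair_scanB, pvOut2]
  | cons v rest ih =>
    intro p first hpair hle
    rcases List.pairwise_cons.mp hpair with ⟨hv_ge, hrest_pair⟩
    have hvp : v ≤ p := hle v List.mem_cons_self
    rw [two_pair_scanB]
    have hzero : ∀ w : Int, v < w → (v :: rest).count w = 0 ∧ rest.count w = 0 := by
      intro w hvw
      constructor <;> rw [List.count_eq_zero] <;> intro h
      · rcases List.mem_cons.mp h with rfl | h'
        · omega
        · have := hv_ge w h'; omega
      · have := hv_ge w h; omega
    by_cases hcond : some p = some v ∧ v ≠ first ∧ 1 ≤ v ∧ v ≤ 6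
    · rw [if_pos hcond]
      obtain ⟨hps, hvf, hv1, hv6⟩ := hcond
      have hpveq : p = v := Option.some.inj hps
      subst hpveq
      have hself : (p :: rest).count p = rest.count p + 1 := List.count_cons_self
      by_cases hf0 : first = 0
      · subst hf0
        rw [if_neg (by simp), if_pos rfl]
        have hcons : pvCand p 0 (p :: rest) = p :: pvCand p p rest := by
          apply pvFilter_cons _ _ _ _ pvFaces_sorted (pvMem_faces p hv1 hv6)
          · simp only [decide_eq_true_eq]
            refine ⟨by omega, Or.inr ⟨by simp, by omega⟩⟩
          · simp only [decide_eq_false_iff_not]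
            simp
          · intro w hw hvw
            obtain ⟨hz1, hz2⟩ := hzero w hvw
            constructor <;> simp only [decide_eq_false_iff_not] <;> omega
          · intro w hw hwv
            have hw16 : 1 ≤ w ∧ w ≤ 6 := by
              rcases (by simpa using hw : w = 6 ∨ w = 5 ∨ w = 4 ∨ w = 3 ∨ w = 2 ∨ w = 1) with h|h|h|h|h|h <;> omega
            have hcc : (p :: rest).count w = rest.count w := List.count_cons_of_ne (by omega)
            simp only [decide_eq_decide]
            rw [hcc]
            omega
        rw [hcons, ih p p hrest_pair hv_ge, if_neg (by omega)]
        cases pvCand p p rest <;> simp [pvOut2]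
      · rw [if_pos hf0, if_neg hf0]
        obtain ⟨t, ht⟩ : ∃ t, pvCand p first (p :: rest) = p :: t := by
          apply pvFilter_head _ _ _ pvFaces_sorted (pvMem_faces p hv1 hv6)
          · simp only [decide_eq_true_eq]
            refine ⟨hvf, Or.inr ⟨by simp, by omega⟩⟩
          · intro w hw hvw
            obtain ⟨hz1, _⟩ := hzero w hvw
            simp only [decide_eq_false_iff_not]
            rw [hz1]
            omega
        rw [ht]
    · rw [if_neg hcond, ih v first hrest_pair hv_ge]
      have hcond' : ¬(p = v ∧ v ≠ first ∧ 1 ≤ v ∧ v ≤ 6) := by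
        intro h; exact hcond ⟨by rw [h.1], h.2.1, h.2.2.1, h.2.2.2⟩
      have hcand : pvCand p first (v :: rest) = pvCand v first rest := by
        apply List.filter_congr
        intro w hw
        have hw16 : 1 ≤ w ∧ w ≤ 6 := by
          rcases (by simpa using hw : w = 6 ∨ w = 5 ∨ w = 4 ∨ w = 3 ∨ w = 2 ∨ w = 1) with h|h|h|h|h|h <;> omega
        simp only [decide_eq_decide]
        by_cases hwv : w = v
        · subst hwv
          have hcc : (w :: rest).count w = rest.count w + 1 := List.count_cons_self
          rw [hcc]
          omega
        · have hcc : (v :: rest).count w = rest.count w := List.count_cons_of_ne (Ne.symm hwv)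
          rw [hcc]
          by_cases hpw : w = p
          · have hvltw : v < w := by omega
            obtain ⟨hz1, hz2⟩ := hzero w hvltw
            rw [hcc] at hz1
            omega
          · omega
      rw [hcand]

-- B sorts once, then its scan produces the same pvOut2 of pvPairs
lemma pvAlt_eq (dice : List Int) : two_pair_alt dice = pvOut2 (pvPairs dice) := by
  have hperm : (PySem.List.sorted dice (fun x => x) true).Perm dice :=
    PySem.List.sorted_perm dice (fun x => x) true
  have hpair : (PySem.List.sorted dice (fun x => x) true).Pairwise (fun a b => b ≤ a) :=
    PySem.List.sorted_pairwise_rev dice (fun x => x)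
  have hcount : ∀ w : Int, (PySem.List.sorted dice (fun x => x) true).count w = dice.count w :=
    fun w => hperm.count_eq w
  rw [two_pair_alt]
  rcases hs : PySem.List.sorted dice (fun x => x) true with _ | ⟨v, rest⟩
  · have : pvPairs dice = [] := by
      apply List.filter_eq_nil_iff.mpr
      intro w hw
      have := hcount w
      rw [hs] at this
      simp only [List.count_nil] at this
      simp [← this]
    rw [this]
    simp [two_pair_scanB, pvOut2]
  · rw [hs] at hpair hcount
    rcases List.pairwise_cons.mp hpair with ⟨hv_ge, hrest_pair⟩
    rw [two_pair_scanB, if_neg (by simp)]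
    rw [pvScan_spec rest v 0 hrest_pair hv_ge, if_pos rfl]
    have h1 : pvCand v 0 rest = pvPairs dice := by
      apply List.filter_congr
      intro w hw
      have hw16 : 1 ≤ w ∧ w ≤ 6 := by
        rcases (by simpa using hw : w = 6 ∨ w = 5 ∨ w = 4 ∨ w = 3 ∨ w = 2 ∨ w = 1) with h|h|h|h|h|h <;> omega
      have hcw := hcount w
      simp only [decide_eq_decide]
      rw [← hcw]
      by_cases hwv : w = v
      · subst hwv
        rw [List.count_cons_self]
        omega
      · rw [List.count_cons_of_ne (Ne.symm hwv)]
        omega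
    rw [h1]

-- ===== VERDICT (by name: the statement is the Claim_ definition above) =====
theorem two_pair_spec : Claim_equal_two_pair := by
  intro dice _
  unfold Spec_two_pair
  rw [pvA_eq, pvAlt_eq]
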